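-- pv_equiv track=rewrite | github.com/ZM-Kimu/Blue-Archive-Asset-Downloader | scripts/update_changelog.py | finalize_release_changelog
-- ===== SOURCE A (Python) =====
-- from collections.abc import Sequence
--
-- CHANGELOG_TITLE = "# Changelog"
--
-- UNRELEASED_TITLE = "Unreleased"
--
-- NO_UNRELEASED_CHANGES = "- No unreleased changes recorded."
--
-- def _load_changelog_sections(content: str) -> tuple[str, list[tuple[str, str]]]:
--     normalized = content.replace("\r\n", "\n")
--     lines = normalized.split("\n")
--     header_lines: list[str] = []
--     sections: list[tuple[str, str]] = []
--     current_title: str | None = None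
--     current_lines: list[str] = []
--
--     for line in lines:
--         if line.startswith("## "):
--             if current_title is not None:
--                 sections.append((current_title, "\n".join(current_lines).strip()))
--             current_title = line[3:].strip()
--             current_lines = []
--             continue
--
--         if current_title is None:
--             header_lines.append(line)
--         else:
--             current_lines.append(line)
--
--     if current_title is None:
--         return (("\n".join(header_lines).strip() or CHANGELOG_TITLE), [])
--
--     sections.append((current_title, "\n".join(current_lines).strip()))
--     return (("\n".join(header_lines).strip() or CHANGELOG_TITLE), sections)
--
-- def _render_changelog(header: str, sections: Sequence[tuple[str, str]]) -> str:
--     lines = [header.strip() or CHANGELOG_TITLE, ""]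
--     for index, (title, body) in enumerate(sections):
--         lines.append(f"## {title}")
--         lines.append("")
--         section_body = body.strip() or NO_UNRELEASED_CHANGES
--         lines.extend(section_body.splitlines())
--         if index != len(sections) - 1:
--             lines.append("")
--             lines.append("")
--     return "\n".join(lines).rstrip() + "\n"
--
-- def finalize_release_changelog(
--     existing_content: str,
--     version: str,
--     release_date: str,
-- ) -> str:
--     header, sections = _load_changelog_sections(existing_content)
--     unreleased_body = NO_UNRELEASED_CHANGES
--     remaining_sections: list[tuple[str, str]] = []
--     release_title = f"v{version} - {release_date}"
--
--     for title, body in sections: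
--         if title == UNRELEASED_TITLE:
--             unreleased_body = body.strip() or NO_UNRELEASED_CHANGES
--             continue
--         if title == release_title:
--             continue
--         remaining_sections.append((title, body))
--
--     finalized_sections = [
--         (UNRELEASED_TITLE, NO_UNRELEASED_CHANGES),
--         (release_title, unreleased_body),
--         *remaining_sections,
--     ]
--     return _render_changelog(header, finalized_sections)
-- ===== SOURCE B (Python) =====
-- CHANGELOG_TITLE = "# Changelog"
-- UNRELEASED_TITLE = "Unreleased"
-- NO_UNRELEASED_CHANGES = "- No unreleased changes recorded."
--
--
-- def _next_mark(lines, start):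
--     j = start
--     while j < len(lines) and not lines[j].startswith("## "):
--         j += 1
--     return j
--
--
-- def finalize_release_changelog(existing_content, version, release_date):
--     lines = existing_content.replace("\r\n", "\n").split("\n")
--     j = _next_mark(lines, 0)
--     header = "\n".join(lines[:j]).strip() or CHANGELOG_TITLE
--     sections = []
--     while j < len(lines):
--         k = _next_mark(lines, j + 1)
--         sections.append((lines[j][3:].strip(), "\n".join(lines[j + 1:k]).strip()))
--         j = k
--
--     release_title = "v" + version + " - " + release_date
--     found = next((b for t, b in reversed(sections) if t == UNRELEASED_TITLE), "")
--     unreleased = found.strip() or NO_UNRELEASED_CHANGES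
--     remaining = [(t, b) for t, b in sections
--                  if t != UNRELEASED_TITLE and t != release_title]
--
--     final = [(UNRELEASED_TITLE, NO_UNRELEASED_CHANGES),
--              (release_title, unreleased)] + remaining
--     chunks = ["## " + t + "\n\n"
--               + "\n".join((b.strip() or NO_UNRELEASED_CHANGES).splitlines())
--               for t, b in final]
--     return (header + "\n\n" + "\n\n\n".join(chunks)).rstrip() + "\n"
-- ===== Notes on version B (the rewrite author's own statement) =====
-- stated objective: alternative
-- what changed: Replaces A's per-line state machine (Optional current title plus four accumulators, then a line-list renderer with an enumerate/last-index test) by a boundary scan that cuts the line list into (title, body) chunks directly, a reversed search plus a filter comprehension for the promote step, and a direct string-chunk join for rendering.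
import Mathlib
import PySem

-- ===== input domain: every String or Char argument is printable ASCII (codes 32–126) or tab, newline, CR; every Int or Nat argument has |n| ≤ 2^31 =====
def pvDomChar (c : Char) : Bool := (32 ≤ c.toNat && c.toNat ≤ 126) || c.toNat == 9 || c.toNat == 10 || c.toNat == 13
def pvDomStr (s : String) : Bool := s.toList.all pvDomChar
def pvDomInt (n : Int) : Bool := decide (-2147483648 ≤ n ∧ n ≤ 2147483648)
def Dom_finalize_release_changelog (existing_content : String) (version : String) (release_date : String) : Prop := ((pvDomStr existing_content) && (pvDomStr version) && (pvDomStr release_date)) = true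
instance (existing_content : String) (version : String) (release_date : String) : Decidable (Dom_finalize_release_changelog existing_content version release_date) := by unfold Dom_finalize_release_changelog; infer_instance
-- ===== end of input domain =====

-- B replaces A's per-line state machine (Optional current title + four accumulators, then a
-- line-list renderer with an enumerate/last-index test) by a boundary scan that cuts the line list
-- into (title, body) chunks directly, a reversed search + filter for the promote step, and a direct
-- string-chunk join for rendering; objective: alternative decomposition (no speed claim).

-- shared string constants of the module
def pvHH : List Char := ['#', '#', ' ']
def pvCT : List Char := "# Changelog".toList
def pvUT : List Char := "Unreleased".toList
def pvNO : List Char := "- No unreleased changes recorded.".toList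
-- Python's `s or d` on strings
def pvOr (s d : List Char) : List Char := if s = [] then d else s
-- "\n".join(...)
def pvJoinNl (ls : List (List Char)) : List Char := PySem.Chars.join ['\n'] ls

-- ===== PORT A =====
-- state: (header_lines, sections, current_title?, current_lines)
def pvLoadStep
    (st : List (List Char) × List (List Char × List Char) × Option (List Char) × List (List Char))
    (line : List Char) :
    List (List Char) × List (List Char × List Char) × Option (List Char) × List (List Char) :=
  let (hdr, secs, cur?, curls) := st
  if PySem.Chars.startswith line pvHH then
    let secs' := match cur? with
      | some t => secs ++ [(t, PySem.Chars.strip (pvJoinNl curls))]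
      | none   => secs
    (hdr, secs', some (PySem.Chars.strip (PySem.Chars.slice line (some 3) none)), [])
  else
    match cur? with
    | none   => (hdr ++ [line], secs, cur?, curls)
    | some _ => (hdr, secs, cur?, curls ++ [line])

-- _load_changelog_sections
def pvLoad (content : List Char) : List Char × List (List Char × List Char) :=
  let normalized := PySem.Chars.replace content ['\r', '\n'] ['\n']
  let lines := PySem.Chars.splitOn normalized ['\n']
  match lines.foldl pvLoadStep ([], [], none, []) with
  | (hdr, _, none, _) => (pvOr (PySem.Chars.strip (pvJoinNl hdr)) pvCT, [])
  | (hdr, secs, some t, curls) =>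
      (pvOr (PySem.Chars.strip (pvJoinNl hdr)) pvCT,
       secs ++ [(t, PySem.Chars.strip (pvJoinNl curls))])

-- body of the render loop (n = len(sections))
def pvRenderStep (n : Nat) (ls : List (List Char)) (e : Int × (List Char × List Char)) :
    List (List Char) :=
  let sb := pvOr (PySem.Chars.strip e.2.2) pvNO
  let ls := ls ++ [pvHH ++ e.2.1, []] ++ PySem.Chars.splitlines sb
  if e.1 ≠ (n : Int) - 1 then ls ++ [[], []] else ls

-- _render_changelog
def pvRender (header : List Char) (sections : List (List Char × List Char)) : List Char :=
  let lines := (PySem.List.enumerate sections).foldl (pvRenderStep sections.length)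
    [pvOr (PySem.Chars.strip header) pvCT, []]
  PySem.Chars.rstrip (pvJoinNl lines) ++ ['\n']

-- body of the promote loop in finalize_release_changelog
def pvFinStep (rt : List Char)
    (st : List Char × List (List Char × List Char)) (tb : List Char × List Char) :
    List Char × List (List Char × List Char) :=
  if tb.1 == pvUT then (pvOr (PySem.Chars.strip tb.2) pvNO, st.2)
  else if tb.1 == rt then st
  else (st.1, st.2 ++ [tb])

def finalize_release_changelog (existing_content : String) (version : String) (release_date : String) : String :=
  let (header, sections) := pvLoad existing_content.toList
  let release_title := 'v' :: version.toList ++ [' ', '-', ' '] ++ release_date.toList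
  let (unreleased_body, remaining) := sections.foldl (pvFinStep release_title) (pvNO, [])
  String.ofList (pvRender header ([(pvUT, pvNO), (release_title, unreleased_body)] ++ remaining))

-- ===== PORT B =====
-- _next_mark: first index ≥ start of a line starting with "## " (or len(lines))
def pvNextMark (lines : List (List Char)) (j : Nat) : Nat :=
  if h : j < lines.length then
    if PySem.Chars.startswith lines[j] pvHH then j else pvNextMark lines (j + 1)
  else j
termination_by lines.length - j

theorem pvNextMark_ge (lines : List (List Char)) (j : Nat) : j ≤ pvNextMark lines j := by
  fun_induction pvNextMark lines j with
  | case1 => omega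
  | case2 _ _ _ ih => omega
  | case3 => omega

-- the while-loop over section chunks in B's finalize_release_changelog
def pvSecLoop (lines : List (List Char)) (j : Nat) (acc : List (List Char × List Char)) :
    List (List Char × List Char) :=
  if h : j < lines.length then
    let k := pvNextMark lines (j + 1)
    pvSecLoop lines k
      (acc ++ [(PySem.Chars.strip (PySem.Chars.slice lines[j] (some 3) none),
                PySem.Chars.strip (pvJoinNl (PySem.List.slice lines (some ((j : Int) + 1)) (some (k : Int)))))])
  else acc
termination_by lines.length - j
decreasing_by
  have := pvNextMark_ge lines (j + 1)
  omega

-- one rendered chunk "## title\n\n<body lines>"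
def pvChunk (tb : List Char × List Char) : List Char :=
  pvHH ++ tb.1 ++ ['\n', '\n'] ++
    pvJoinNl (PySem.Chars.splitlines (pvOr (PySem.Chars.strip tb.2) pvNO))

def finalize_release_changelog_alt (existing_content : String) (version : String) (release_date : String) : String :=
  let lines := PySem.Chars.splitOn (PySem.Chars.replace existing_content.toList ['\r', '\n'] ['\n']) ['\n']
  let j := pvNextMark lines 0
  let header := pvOr (PySem.Chars.strip (pvJoinNl (PySem.List.slice lines none (some (j : Int))))) pvCT
  let sections := pvSecLoop lines j []
  let release_title := 'v' :: version.toList ++ [' ', '-', ' '] ++ release_date.toList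
  let found := match sections.reverse.find? (fun tb => tb.1 == pvUT) with
    | some tb => tb.2
    | none => []
  let unreleased := pvOr (PySem.Chars.strip found) pvNO
  let remaining := sections.filter (fun tb => !(tb.1 == pvUT) && !(tb.1 == release_title))
  let chunks := ([(pvUT, pvNO), (release_title, unreleased)] ++ remaining).map pvChunk
  String.ofList (PySem.Chars.rstrip (header ++ ['\n', '\n'] ++ PySem.Chars.join ['\n', '\n', '\n'] chunks) ++ ['\n'])

-- ===== PRECONDITION & SPEC =====
def Spec_finalize_release_changelog (existing_content : String) (version : String) (release_date : String) (out : String) : Prop := out = finalize_release_changelog_alt existing_content version release_date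
instance (existing_content : String) (version : String) (release_date : String) (out : String) : Decidable (Spec_finalize_release_changelog existing_content version release_date out) := by unfold Spec_finalize_release_changelog; infer_instance

-- ===== CLAIM (what is proved, stated in full; the proofs are below) =====
def Claim_equal_finalize_release_changelog : Prop := ∀ (existing_content : String) (version : String) (release_date : String), Dom_finalize_release_changelog existing_content version release_date → Spec_finalize_release_changelog existing_content version release_date (finalize_release_changelog existing_content version release_date)

-- ===== LEMMAS AND PROOFS =====

-- "line is not a section mark"
def pvNM (l : List Char) : Bool := !(PySem.Chars.startswith l pvHH)

-- recursive characterization of the section list both parsers produce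
def pvPS : List (List Char) → List (List Char × List Char)
  | [] => []
  | l :: rest =>
      (PySem.Chars.strip (PySem.Chars.slice l (some 3) none),
       PySem.Chars.strip (pvJoinNl (rest.takeWhile pvNM))) :: pvPS (rest.dropWhile pvNM)
termination_by l => l.length
decreasing_by
  exact Nat.lt_succ_of_le (List.length_dropWhile_le _ _)
theorem pvNextMark_eq (lines : List (List Char)) (j : Nat) :
    pvNextMark lines j = j + ((lines.drop j).takeWhile pvNM).length := by
  fun_induction pvNextMark lines j with
  | case1 j h hm =>
    rw [List.drop_eq_getElem_cons h, List.takeWhile_cons]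
    simp [pvNM, hm]
  | case2 j h hm ih =>
    rw [List.drop_eq_getElem_cons h, List.takeWhile_cons]
    simp only [pvNM, hm, Bool.not_false, if_pos]
    simp [ih]; omega
  | case3 j h =>
    rw [List.drop_eq_nil_of_le (by omega)]
    simp
theorem pvTake_takeWhile {α} (p : α → Bool) (l : List α) :
    l.take (l.takeWhile p).length = l.takeWhile p :=
  (List.prefix_iff_eq_take.mp (List.takeWhile_prefix p)).symm

theorem pvDrop_takeWhile {α} (p : α → Bool) (l : List α) :
    l.drop (l.takeWhile p).length = l.dropWhile p := by
  have h := List.drop_left (l₁ := l.takeWhile p) (l₂ := l.dropWhile p)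
  rw [List.takeWhile_append_dropWhile] at h
  exact h

theorem pvSecLoop_eq (lines : List (List Char)) (j : Nat) (acc : List (List Char × List Char)) :
    pvSecLoop lines j acc = acc ++ pvPS (lines.drop j) := by
  fun_induction pvSecLoop lines j acc with
  | case1 j acc h k ih =>
    rw [ih]
    rw [List.drop_eq_getElem_cons h, pvPS]
    have hk : k = (j + 1) + ((lines.drop (j+1)).takeWhile pvNM).length := pvNextMark_eq lines (j+1)
    have hslice : PySem.List.slice lines (some ((j : Int) + 1)) (some (k : Int)) =
        (lines.drop (j+1)).takeWhile pvNM := by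
      have h1 : ((j : Int) + 1) = ((j + 1 : Nat) : Int) := by push_cast; ring
      rw [h1, PySem.List.slice_toNat _ (by positivity) (by positivity)]
      simp only [Int.toNat_natCast]
      rw [hk]
      simp [pvTake_takeWhile]
    have hdrop : lines.drop k = (lines.drop (j+1)).dropWhile pvNM := by
      have hd := pvDrop_takeWhile pvNM (lines.drop (j+1))
      rw [List.drop_drop] at hd
      rw [hk, ← hd]
    rw [hslice, hdrop, List.append_assoc]
    simp
  | case2 j acc h =>
    rw [List.drop_eq_nil_of_le (by omega), pvPS]
    simp

theorem pvS1 (ls : List (List Char)) :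
    ∀ hdr secs t cls, ∃ secsF tF clsF,
      ls.foldl pvLoadStep (hdr, secs, some t, cls) = (hdr, secsF, some tF, clsF) ∧
      secsF ++ [(tF, PySem.Chars.strip (pvJoinNl clsF))] =
        secs ++ (t, PySem.Chars.strip (pvJoinNl (cls ++ ls.takeWhile pvNM))) ::
          pvPS (ls.dropWhile pvNM) := by
  induction ls with
  | nil =>
    intro hdr secs t cls
    exact ⟨secs, t, cls, rfl, by simp [pvPS]⟩
  | cons l rest ih =>
    intro hdr secs t cls
    by_cases hm : PySem.Chars.startswith l pvHH
    · have hstep : pvLoadStep (hdr, secs, some t, cls) l =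
        (hdr, secs ++ [(t, PySem.Chars.strip (pvJoinNl cls))],
         some (PySem.Chars.strip (PySem.Chars.slice l (some 3) none)), []) := by
        simp [pvLoadStep, hm]
      obtain ⟨sF, tF, cF, heq, hval⟩ := ih hdr
        (secs ++ [(t, PySem.Chars.strip (pvJoinNl cls))])
        (PySem.Chars.strip (PySem.Chars.slice l (some 3) none)) []
      refine ⟨sF, tF, cF, ?_, ?_⟩
      · rw [List.foldl_cons, hstep]; exact heq
      · rw [hval]
        have htw : (l :: rest).takeWhile pvNM = [] := by simp [pvNM, hm]
        have hdw : (l :: rest).dropWhile pvNM = l :: rest := by simp [pvNM, hm]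
        rw [htw, hdw, pvPS]
        simp
    · have hstep : pvLoadStep (hdr, secs, some t, cls) l = (hdr, secs, some t, cls ++ [l]) := by
        simp [pvLoadStep, hm]
      obtain ⟨sF, tF, cF, heq, hval⟩ := ih hdr secs t (cls ++ [l])
      refine ⟨sF, tF, cF, ?_, ?_⟩
      · rw [List.foldl_cons, hstep]; exact heq
      · rw [hval]
        have htw : (l :: rest).takeWhile pvNM = l :: rest.takeWhile pvNM := by
          simp [pvNM, hm]
        have hdw : (l :: rest).dropWhile pvNM = rest.dropWhile pvNM := by
          simp [pvNM, hm]
        rw [htw, hdw]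
        simp

theorem pvS2 (ls : List (List Char)) :
    ∀ hdr,
      (ls.dropWhile pvNM = [] ∧
        ls.foldl pvLoadStep (hdr, [], none, []) = (hdr ++ ls, [], none, [])) ∨
      (∃ secsF tF clsF,
        ls.foldl pvLoadStep (hdr, [], none, []) =
          (hdr ++ ls.takeWhile pvNM, secsF, some tF, clsF) ∧
        secsF ++ [(tF, PySem.Chars.strip (pvJoinNl clsF))] = pvPS (ls.dropWhile pvNM)) := by
  induction ls with
  | nil => intro hdr; exact Or.inl ⟨rfl, by simp⟩
  | cons l rest ih =>
    intro hdr
    by_cases hm : PySem.Chars.startswith l pvHH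
    · right
      have hstep : pvLoadStep (hdr, [], none, []) l =
          (hdr, [], some (PySem.Chars.strip (PySem.Chars.slice l (some 3) none)), []) := by
        simp [pvLoadStep, hm]
      obtain ⟨sF, tF, cF, heq, hval⟩ := pvS1 rest hdr []
        (PySem.Chars.strip (PySem.Chars.slice l (some 3) none)) []
      refine ⟨sF, tF, cF, ?_, ?_⟩
      · rw [List.foldl_cons, hstep, heq]
        have htw : (l :: rest).takeWhile pvNM = [] := by simp [pvNM, hm]
        rw [htw]; simp
      · have hdw : (l :: rest).dropWhile pvNM = l :: rest := by simp [pvNM, hm]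
        rw [hval, hdw, pvPS]; simp
    · have hstep : pvLoadStep (hdr, [], none, []) l = (hdr ++ [l], [], none, []) := by
        simp [pvLoadStep, hm]
      have htw : (l :: rest).takeWhile pvNM = l :: rest.takeWhile pvNM := by
        simp [pvNM, hm]
      have hdw : (l :: rest).dropWhile pvNM = rest.dropWhile pvNM := by
        simp [pvNM, hm]
      rcases ih (hdr ++ [l]) with ⟨h1, h2⟩ | ⟨sF, tF, cF, heq, hval⟩
      · left
        constructor
        · rw [hdw]; exact h1
        · rw [List.foldl_cons, hstep, h2]; simp
      · right
        refine ⟨sF, tF, cF, ?_, ?_⟩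
        · rw [List.foldl_cons, hstep, heq, htw]; simp
        · rw [hval, hdw]

theorem pvLoad_eq (content : List Char) :
    pvLoad content =
      (pvOr (PySem.Chars.strip (pvJoinNl
          ((PySem.Chars.splitOn (PySem.Chars.replace content ['\r', '\n'] ['\n']) ['\n']).takeWhile pvNM))) pvCT,
       pvPS ((PySem.Chars.splitOn (PySem.Chars.replace content ['\r', '\n'] ['\n']) ['\n']).dropWhile pvNM)) := by
  unfold pvLoad
  dsimp only
  set ls := PySem.Chars.splitOn (PySem.Chars.replace content ['\r', '\n'] ['\n']) ['\n'] with hls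
  rcases pvS2 ls [] with ⟨h1, h2⟩ | ⟨sF, tF, cF, heq, hval⟩
  · rw [h2]
    have h3 : ls.takeWhile pvNM = ls := by
      have h4 := List.takeWhile_append_dropWhile (p := pvNM) (l := ls)
      rw [h1, List.append_nil] at h4
      exact h4
    rw [h1, h3]
    simp [pvPS]
  · rw [heq]
    simp only [List.nil_append]
    rw [hval]

theorem pvFin_eq (rt : List Char) (secs : List (List Char × List Char)) :
    ∀ ub rem,
      secs.foldl (pvFinStep rt) (ub, rem) =
        ((match secs.reverse.find? (fun tb => tb.1 == pvUT) with
          | some tb => pvOr (PySem.Chars.strip tb.2) pvNO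
          | none => ub),
         rem ++ secs.filter (fun tb => !(tb.1 == pvUT) && !(tb.1 == rt))) := by
  induction secs with
  | nil => intro ub rem; simp
  | cons s rest ih =>
    intro ub rem
    rw [List.foldl_cons, List.reverse_cons, List.find?_append]
    by_cases hU : s.1 == pvUT
    · have hstep : pvFinStep rt (ub, rem) s = (pvOr (PySem.Chars.strip s.2) pvNO, rem) := by
        simp [pvFinStep, hU]
      rw [hstep, ih]
      have : List.find? (fun tb => tb.1 == pvUT) [s] = some s := by simp [List.find?, hU]
      rw [this]
      cases h : rest.reverse.find? (fun tb => tb.1 == pvUT) <;>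
        simp [hU]
    · by_cases hR : s.1 == rt
      · have hstep : pvFinStep rt (ub, rem) s = (ub, rem) := by simp [pvFinStep, hU, hR]
        rw [hstep, ih]
        have : List.find? (fun tb => tb.1 == pvUT) [s] = none := by
          simp only [List.find?]
          have hf : (s.1 == pvUT) = false := by simpa using hU
          rw [hf]
        rw [this]
        cases h : rest.reverse.find? (fun tb => tb.1 == pvUT) <;>
          simp [hU, hR]
      · have hstep : pvFinStep rt (ub, rem) s = (ub, rem ++ [s]) := by simp [pvFinStep, hU, hR]
        rw [hstep, ih]
        have : List.find? (fun tb => tb.1 == pvUT) [s] = none := by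
          simp only [List.find?]
          have hf : (s.1 == pvUT) = false := by simpa using hU
          rw [hf]
        rw [this]
        cases h : rest.reverse.find? (fun tb => tb.1 == pvUT) <;>
          simp [hU, hR]

theorem pvDropWhile_of_prefix {p : Char → Bool} {x y : List Char}
    (hpre : y <+: x) (hx : List.dropWhile p x = x) : List.dropWhile p y = y := by
  cases y with
  | nil => simp
  | cons c t =>
    obtain ⟨s, hs⟩ := hpre
    subst hs
    rw [List.cons_append, List.dropWhile_cons] at hx
    by_cases hc : p c
    · exfalso
      rw [if_pos hc] at hx
      have hle := List.length_dropWhile_le p (t ++ s)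
      rw [hx] at hle
      simp at hle
    · rw [List.dropWhile_cons, if_neg hc]

theorem pvDropWhile_idem (p : Char → Bool) (l : List Char) :
    List.dropWhile p (List.dropWhile p l) = List.dropWhile p l := by
  induction l with
  | nil => simp
  | cons c t ih =>
    rw [List.dropWhile_cons]
    by_cases hc : p c
    · rw [if_pos hc]; exact ih
    · rw [if_neg hc, List.dropWhile_cons, if_neg hc]

theorem pvLstrip_strip (s : List Char) :
    PySem.Chars.lstrip (PySem.Chars.strip s) = PySem.Chars.strip s := by
  unfold PySem.Chars.strip PySem.Chars.rstrip PySem.Chars.lstrip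
  apply pvDropWhile_of_prefix (x := List.dropWhile PySem.Chars.isspace s)
  · have h1 : List.dropWhile PySem.Chars.isspace (List.dropWhile PySem.Chars.isspace s).reverse <:+
        (List.dropWhile PySem.Chars.isspace s).reverse := List.dropWhile_suffix _
    have h2 := List.reverse_prefix.mpr h1
    rwa [List.reverse_reverse] at h2
  · exact pvDropWhile_idem _ _

theorem pvStrip_strip (s : List Char) :
    PySem.Chars.strip (PySem.Chars.strip s) = PySem.Chars.strip s := by
  conv_lhs => rw [PySem.Chars.strip]
  rw [pvLstrip_strip]
  conv_lhs => rw [PySem.Chars.strip]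
  unfold PySem.Chars.rstrip PySem.Chars.lstrip
  rw [List.reverse_reverse, pvDropWhile_idem]
  rfl

theorem pvOr_strip_pvOr (s : List Char) :
    pvOr (PySem.Chars.strip (pvOr (PySem.Chars.strip s) pvCT)) pvCT =
      pvOr (PySem.Chars.strip s) pvCT := by
  unfold pvOr
  by_cases h : PySem.Chars.strip s = []
  · rw [h, if_pos rfl]
    have h1 : PySem.Chars.strip pvCT = pvCT := by decide
    rw [h1, if_neg (by decide : pvCT ≠ [])]
  · rw [if_neg h, pvStrip_strip, if_neg h]

theorem pvSplitlinesGo_ne_nil (isB : Char → Bool) :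
    ∀ n (s cur : List Char) (acc : List (List Char)), s.length ≤ n →
      (s ≠ [] ∨ cur ≠ [] ∨ acc ≠ []) →
      PySem.Chars.splitlines.go isB s cur acc ≠ [] := by
  intro n
  induction n with
  | zero =>
    intro s cur acc hlen h
    have hsnil : s = [] := List.eq_nil_of_length_eq_zero (by omega)
    subst hsnil
    rw [PySem.Chars.splitlines.go]
    rcases h with h | h | h
    · exact absurd rfl h
    · simp [List.isEmpty_iff, h]
    · by_cases hc : cur = [] <;> simp [List.isEmpty_iff, hc, h]
  | succ n ih =>
    intro s cur acc hlen h
    rw [PySem.Chars.splitlines.go.eq_def]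
    split
    · rcases h with h | h | h
      · exact absurd rfl h
      · simp [List.isEmpty_iff, h]
      · by_cases hc : cur = [] <;> simp [List.isEmpty_iff, hc, h]
    · refine ih _ _ _ ?_ (by simp)
      simp at hlen ⊢; omega
    · split
      · refine ih _ _ _ ?_ (by simp)
        simp at hlen ⊢; omega
      · refine ih _ _ _ ?_ (by simp)
        simp at hlen ⊢; omega

theorem pvSplitlines_ne_nil (s : List Char) (h : s ≠ []) : PySem.Chars.splitlines s ≠ [] := by
  unfold PySem.Chars.splitlines
  exact pvSplitlinesGo_ne_nil _ s.length s [] [] le_rfl (Or.inl h)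

theorem pvJoin_append (sep : List Char) (xs ys : List (List Char)) (hx : xs ≠ []) (hy : ys ≠ []) :
    PySem.Chars.join sep (xs ++ ys) =
      PySem.Chars.join sep xs ++ sep ++ PySem.Chars.join sep ys := by
  induction xs with
  | nil => exact absurd rfl hx
  | cons x xs ih =>
    cases xs with
    | nil =>
      cases ys with
      | nil => exact absurd rfl hy
      | cons y ys =>
        rw [List.singleton_append, PySem.Chars.join_cons_cons, PySem.Chars.join_singleton]
    | cons x' xs' =>
      have ih' := ih (by simp)
      rw [List.cons_append] at ih'
      rw [List.cons_append, List.cons_append, PySem.Chars.join_cons_cons, ih',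
        PySem.Chars.join_cons_cons]
      simp
def pvLinesOf : List (List Char × List Char) → List (List Char)
  | [] => []
  | [tb] => [pvHH ++ tb.1, []] ++ PySem.Chars.splitlines (pvOr (PySem.Chars.strip tb.2) pvNO)
  | tb :: rest =>
      [pvHH ++ tb.1, []] ++ PySem.Chars.splitlines (pvOr (PySem.Chars.strip tb.2) pvNO) ++
        [[], []] ++ pvLinesOf rest

theorem pvLinesOf_ne_nil (secs : List (List Char × List Char)) (h : secs ≠ []) :
    pvLinesOf secs ≠ [] := by
  match secs with
  | [tb] => simp [pvLinesOf]
  | tb :: t :: r => simp [pvLinesOf]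

theorem pvOr_ne_nil (s : List Char) : pvOr (PySem.Chars.strip s) pvNO ≠ [] := by
  unfold pvOr
  by_cases h : PySem.Chars.strip s = []
  · simp [h]; decide
  · simp [h]

theorem pvRender_fold (n : Nat) (secs : List (List Char × List Char)) :
    ∀ (k : Int) acc, secs ≠ [] → k + secs.length = n →
      (PySem.List.enumerate secs k).foldl (pvRenderStep n) acc = acc ++ pvLinesOf secs := by
  induction secs with
  | nil => intro k acc h; exact absurd rfl h
  | cons tb rest ih =>
    intro k acc _ hk
    rw [PySem.List.enumerate_cons, List.foldl_cons]
    cases rest with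
    | nil =>
      have hlast : ¬ (k ≠ (n : Int) - 1) := by simp at hk ⊢; omega
      rw [PySem.List.enumerate_nil, List.foldl_nil]
      simp only [pvRenderStep, if_neg hlast]
      simp [pvLinesOf]
    | cons t r =>
      have hnot : (k ≠ (n : Int) - 1) := by simp at hk ⊢; omega
      have hstep : pvRenderStep n acc (k, tb) =
          acc ++ [pvHH ++ tb.1, []] ++
            PySem.Chars.splitlines (pvOr (PySem.Chars.strip tb.2) pvNO) ++ [[], []] := by
        simp only [pvRenderStep, if_pos hnot]
      rw [hstep, ih (k + 1) _ (by simp) (by simp at hk ⊢; omega)]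
      simp [pvLinesOf]

theorem pvJoin_linesOf (secs : List (List Char × List Char)) (h : secs ≠ []) :
    pvJoinNl (pvLinesOf secs) = PySem.Chars.join ['\n', '\n', '\n'] (secs.map pvChunk) := by
  induction secs with
  | nil => exact absurd rfl h
  | cons tb rest ih =>
    cases rest with
    | nil =>
      show pvJoinNl ([pvHH ++ tb.1, []] ++
        PySem.Chars.splitlines (pvOr (PySem.Chars.strip tb.2) pvNO)) = _
      have hsl := pvSplitlines_ne_nil _ (pvOr_ne_nil tb.2)
      unfold pvJoinNl
      cases hsplit : PySem.Chars.splitlines (pvOr (PySem.Chars.strip tb.2) pvNO) with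
      | nil => exact absurd hsplit hsl
      | cons q r =>
        rw [List.cons_append, List.cons_append, List.nil_append,
          PySem.Chars.join_cons_cons, PySem.Chars.join_cons_cons]
        simp [pvChunk, pvJoinNl, hsplit, PySem.Chars.join_singleton]
    | cons t r =>
      show pvJoinNl ([pvHH ++ tb.1, []] ++
        PySem.Chars.splitlines (pvOr (PySem.Chars.strip tb.2) pvNO) ++ [[], []] ++ pvLinesOf (t :: r)) = _
      have hsl := pvSplitlines_ne_nil _ (pvOr_ne_nil tb.2)
      have hlo := pvLinesOf_ne_nil (t :: r) (by simp)
      unfold pvJoinNl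
      rw [List.map_cons, List.map_cons, PySem.Chars.join_cons_cons]
      rw [show [pvHH ++ tb.1, []] ++ PySem.Chars.splitlines (pvOr (PySem.Chars.strip tb.2) pvNO)
            ++ [[], []] ++ pvLinesOf (t :: r)
          = ([pvHH ++ tb.1, []] ++ PySem.Chars.splitlines (pvOr (PySem.Chars.strip tb.2) pvNO))
            ++ (([[], []]) ++ pvLinesOf (t :: r)) by simp]
      rw [pvJoin_append ['\n'] _ _ (by simp) (by simp)]
      cases hlocons : pvLinesOf (t :: r) with
      | nil => exact absurd hlocons hlo
      | cons q r' =>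
        rw [show ([[], []] : List (List Char)) ++ q :: r' = [] :: [] :: q :: r' by simp]
        rw [PySem.Chars.join_cons_cons, PySem.Chars.join_cons_cons]
        cases hsplit : PySem.Chars.splitlines (pvOr (PySem.Chars.strip tb.2) pvNO) with
        | nil => exact absurd hsplit hsl
        | cons q2 r2 =>
          rw [List.cons_append, List.cons_append, List.nil_append,
            PySem.Chars.join_cons_cons, PySem.Chars.join_cons_cons]
          have ihx := ih (by simp)
          unfold pvJoinNl at ihx
          rw [← hlocons, ihx]
          simp [pvChunk, pvJoinNl, hsplit]

theorem pvRender_eq (header : List Char) (secs : List (List Char × List Char)) (h : secs ≠ []) :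
    pvRender header secs =
      PySem.Chars.rstrip (pvOr (PySem.Chars.strip header) pvCT ++ ['\n', '\n'] ++
        PySem.Chars.join ['\n', '\n', '\n'] (secs.map pvChunk)) ++ ['\n'] := by
  unfold pvRender
  rw [pvRender_fold secs.length secs 0 _ h (by simp)]
  have hlo := pvLinesOf_ne_nil secs h
  cases hlocons : pvLinesOf secs with
  | nil => exact absurd hlocons hlo
  | cons q r =>
    show PySem.Chars.rstrip (pvJoinNl ([pvOr (PySem.Chars.strip header) pvCT, []] ++ q :: r)) ++ _ = _
    unfold pvJoinNl
    rw [List.cons_append, List.cons_append, List.nil_append,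
      PySem.Chars.join_cons_cons, PySem.Chars.join_cons_cons]
    have hjl := pvJoin_linesOf secs h
    unfold pvJoinNl at hjl
    rw [← hlocons, hjl]
    simp


-- ===== VERDICT (by name: the statement is the Claim_ definition above) =====
theorem finalize_release_changelog_spec : Claim_equal_finalize_release_changelog := by
  intro c v d _
  unfold Spec_finalize_release_changelog
  unfold finalize_release_changelog finalize_release_changelog_alt
  rw [pvLoad_eq]
  dsimp only
  set lines := PySem.Chars.splitOn (PySem.Chars.replace c.toList ['\r', '\n'] ['\n']) ['\n'] with hlines
  set tw := lines.takeWhile pvNM with htw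
  set dw := lines.dropWhile pvNM with hdw
  set rt := 'v' :: v.toList ++ [' ', '-', ' '] ++ d.toList with hrt
  -- B's scan produces the same header and sections
  have hj : pvNextMark lines 0 = tw.length := by
    rw [pvNextMark_eq]; simp [htw]
  have hslice : PySem.List.slice lines none (some ((pvNextMark lines 0 : Nat) : Int)) = tw := by
    rw [hj, PySem.List.slice_to]
    · simp [htw, pvTake_takeWhile]
    · positivity
  have hsecB : pvSecLoop lines (pvNextMark lines 0) [] = pvPS dw := by
    rw [pvSecLoop_eq, hj, hdw, htw, pvDrop_takeWhile]
    simp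
  rw [hslice, hsecB, pvFin_eq]
  -- unreleased bodies agree
  have hub : (match (pvPS dw).reverse.find? (fun tb => tb.1 == pvUT) with
      | some tb => pvOr (PySem.Chars.strip tb.2) pvNO
      | none => pvNO) =
      pvOr (PySem.Chars.strip (match (pvPS dw).reverse.find? (fun tb => tb.1 == pvUT) with
        | some tb => tb.2
        | none => [])) pvNO := by
    cases h : (pvPS dw).reverse.find? (fun tb => tb.1 == pvUT) with
    | none => simp [pvOr]; decide
    | some tb => rfl
  rw [pvRender_eq _ _ (by simp), pvOr_strip_pvOr, hub]
  simp
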